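-- pv_equiv track=rewrite | github.com/kamilGie/ASRT-WDI | Zestaw_1:_Proste_programy_z_pętlami/43/Rozwiązania/main.py | Zadanie_43
-- ===== SOURCE A (Python) =====
-- def Zadanie_43(S):
--     n = 1
--     while 10**n <= S:
--         n += 1
--     start = 10 ** (n - 1)  # Najmniejsza liczba o n cyfrach
--     end = 10**n  # Najmniejsza liczba o (n+1) cyfrach
--
--     # Szukamy największej liczby od końca zakresu
--     for liczba in range(end - 1, start - 1, -1):
--         suma_poteg = 0
--         tmp = liczba
--         while tmp > 0:
--             suma_poteg += (tmp % 10) ** n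
--             tmp //= 10
--         if suma_poteg == S:
--             return liczba
--     return None
-- ===== SOURCE B (Python) =====
-- def Zadanie_43(S):
--     # Enumerate digit multisets (nonincreasing digit lists) in lex-descending
--     # order instead of scanning all n-digit numbers; the first matching multiset,
--     # read as a number, is the largest n-digit number whose digit^n sum equals S.
--     n = 1
--     while 10 ** n <= S:
--         n += 1
--
--     def combos(max_d, k):
--         # all nonincreasing lists of k digits, each in [0, max_d], lex-descending
--         if k == 0:
--             yield []
--         else:
--             for d in range(max_d, -1, -1):
--                 for rest in combos(d, k - 1):
--                     yield [d] + rest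
--
--     for first in range(9, 0, -1):
--         for rest in combos(first, n - 1):
--             digits = [first] + rest
--             if sum(d ** n for d in digits) == S:
--                 num = 0
--                 for d in digits:
--                     num = 10 * num + d
--                 return num
--     return None
-- ===== Notes on version B (the rewrite author's own statement) =====
-- stated objective: faster
-- what changed: Instead of scanning all n-digit numbers downward and recomputing the digit power sum for each, B enumerates digit multisets (nonincreasing digit lists) in lexicographically descending order and returns the first one whose power sum equals S, read as a number; that candidate is the largest matching n-digit number.
import Mathlib
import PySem

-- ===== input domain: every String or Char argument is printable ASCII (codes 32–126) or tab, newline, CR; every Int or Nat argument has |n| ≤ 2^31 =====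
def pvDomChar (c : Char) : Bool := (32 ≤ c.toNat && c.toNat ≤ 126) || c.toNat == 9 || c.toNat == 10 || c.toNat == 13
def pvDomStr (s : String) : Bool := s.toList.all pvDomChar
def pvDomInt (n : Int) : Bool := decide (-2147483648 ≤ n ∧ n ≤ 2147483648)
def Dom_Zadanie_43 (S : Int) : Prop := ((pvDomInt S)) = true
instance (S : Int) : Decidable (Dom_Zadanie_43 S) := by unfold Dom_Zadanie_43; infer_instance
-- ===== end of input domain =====

-- B replaces A's descending scan over all n-digit numbers by an enumeration of digit
-- multisets in lex-descending order (first matching multiset, read as a number, is the answer).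

-- ===== PORT A =====
-- shared helper: 'n = 1; while 10**n <= S: n += 1' (identical in both Pythons).
-- The counter n is kept as a Nat since it starts at 1 and only increases; 10**n is (10:Int)^n (exact for n ≥ 0).
def pvNLoop (S : Int) (n : Nat) : Nat :=
  if (10:Int) ^ n ≤ S then pvNLoop S (n + 1) else n
termination_by (S + 1 - 10 ^ n).toNat
decreasing_by
  have h1 : (10:Int) ^ n < 10 ^ (n + 1) := by
    exact pow_lt_pow_right₀ (by norm_num) (Nat.lt_succ_self n)
  generalize hA : ((10:Int) ^ n) = A at *
  generalize hB : ((10:Int) ^ (n + 1)) = B at *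
  omega

-- 'suma_poteg = 0; tmp = liczba; while tmp > 0: suma_poteg += (tmp % 10) ** n; tmp //= 10'
def powLoopA (n : Nat) (tmp suma : Int) : Int :=
  if 0 < tmp then powLoopA n (PySem.Int.floordiv tmp 10) (suma + (PySem.Int.mod tmp 10) ^ n)
  else suma
termination_by tmp.toNat
decreasing_by
  rw [PySem.Int.floordiv_eq_ediv_of_pos (by norm_num)]
  omega

-- 'for liczba in range(end-1, start-1, -1): … if suma_poteg == S: return liczba / return None'
def scanA (S : Int) (n : Nat) : List Int → Option Int
  | [] => none
  | x :: rest => if powLoopA n x 0 = S then some x else scanA S n rest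

def Zadanie_43 (S : Int) : Option Int :=
  let n := pvNLoop S 1
  let start : Int := 10 ^ (n - 1)
  let stop : Int := 10 ^ n
  scanA S n (PySem.List.pyRange (stop - 1) (start - 1) (-1))

-- ===== PORT B =====
-- generator combos(max_d, k): nonincreasing digit lists, entries in [0, max_d], lex-descending
def combosB (m : Int) (k : Nat) : List (List Int) :=
  match k with
  | 0 => [[]]
  | k' + 1 => (PySem.List.pyRange m (-1) (-1)).flatMap (fun d => (combosB d k').map (fun r => d :: r))

-- 'sum(d ** n for d in digits)'
def sumPowB (digits : List Int) (n : Nat) : Int := digits.foldl (fun a d => a + d ^ n) 0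

-- 'num = 0; for d in digits: num = 10 * num + d'
def numOfB (digits : List Int) : Int := digits.foldl (fun a d => 10 * a + d) 0

-- inner 'for rest in combos(first, n-1): …'
def innerB (S : Int) (n : Nat) (first : Int) : List (List Int) → Option Int
  | [] => none
  | rest :: rs =>
    let digits := first :: rest
    if sumPowB digits n = S then some (numOfB digits) else innerB S n first rs

-- outer 'for first in range(9, 0, -1): …'
def outerB (S : Int) (n : Nat) : List Int → Option Int
  | [] => none
  | f :: fs =>
    match innerB S n f (combosB f (n - 1)) with
    | some v => some v
    | none => outerB S n fs

def Zadanie_43_alt (S : Int) : Option Int :=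
  let n := pvNLoop S 1
  outerB S n (PySem.List.pyRange 9 0 (-1))

-- ===== PRECONDITION & SPEC =====
def Spec_Zadanie_43 (S : Int) (out : Option Int) : Prop := out = Zadanie_43_alt S
instance (S : Int) (out : Option Int) : Decidable (Spec_Zadanie_43 S out) := by unfold Spec_Zadanie_43; infer_instance

-- ===== CLAIM (what is proved, stated in full; the proofs are below) =====
def Claim_equal_Zadanie_43 : Prop := ∀ (S : Int), Dom_Zadanie_43 S → Spec_Zadanie_43 S (Zadanie_43 S)

-- ===== LEMMAS AND PROOFS =====

-- digit lists and basic notions used by the proof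
def isDig (l : List Int) : Prop := ∀ d ∈ l, 0 ≤ d ∧ d < 10

-- nonincreasing, bounded by m, nonnegative
def NI : Int → List Int → Prop
  | _, [] => True
  | m, d :: t => 0 ≤ d ∧ d ≤ m ∧ NI d t

-- strict lexicographic order on equal-length lists
def lexGT : List Int → List Int → Prop
  | a :: l, b :: t => b < a ∨ (a = b ∧ lexGT l t)
  | _, _ => False

-- least-significant-first digit expansion
def lsd : Nat → Int → List Int
  | 0, _ => []
  | k + 1, x => x % 10 :: lsd k (x / 10)

def sumPow (n : Nat) (l : List Int) : Int := (l.map (fun d => d ^ n)).sum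

def pvBigL (n : Nat) : List (List Int) :=
  (PySem.List.pyRange 9 0 (-1)).flatMap (fun f => (combosB f (n - 1)).map (fun r => f :: r))

theorem pvNLoop_ge (S : Int) (n : Nat) : n ≤ pvNLoop S n := by
  induction n using pvNLoop.induct S with
  | case1 n h ih =>
    rw [pvNLoop, if_pos h]
    omega
  | case2 n h =>
    rw [pvNLoop, if_neg h]

theorem foldl_numOfB (l : List Int) (a : Int) :
    l.foldl (fun a d => 10 * a + d) a = a * 10 ^ l.length + numOfB l := by
  induction l generalizing a with
  | nil => simp [numOfB]
  | cons d t ih =>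
    have hN : numOfB (d :: t) = d * 10 ^ t.length + numOfB t := by
      have := ih d
      simp only [numOfB, List.foldl_cons]
      simpa using this
    simp only [List.foldl_cons, List.length_cons, hN]
    rw [ih (10 * a + d)]
    ring

theorem numOfB_cons (d : Int) (t : List Int) :
    numOfB (d :: t) = d * 10 ^ t.length + numOfB t := by
  have := foldl_numOfB t d
  simp only [numOfB, List.foldl_cons]
  simpa using this

theorem numOfB_append (l : List Int) (d : Int) :
    numOfB (l ++ [d]) = 10 * numOfB l + d := by
  simp [numOfB, List.foldl_append]

theorem numOfB_bounds (l : List Int) (h : isDig l) :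
    0 ≤ numOfB l ∧ numOfB l < 10 ^ l.length := by
  induction l with
  | nil => simp [numOfB]
  | cons d t ih =>
    have hd := h d (by simp)
    have ht : isDig t := fun x hx => h x (by simp [hx])
    have ⟨h1, h2⟩ := ih ht
    have hp : (0:Int) < 10 ^ t.length := by positivity
    rw [numOfB_cons, List.length_cons, pow_succ]
    constructor
    · nlinarith
    · nlinarith

theorem sumPowB_eq (l : List Int) (n : Nat) : sumPowB l n = sumPow n l := by
  suffices h : ∀ a : Int, l.foldl (fun a d => a + d ^ n) a = a + sumPow n l by
    simpa [sumPowB] using h 0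
  induction l with
  | nil => simp [sumPow]
  | cons d t ih =>
    intro a
    simp only [List.foldl_cons]
    rw [ih (a + d ^ n)]
    simp [sumPow]
    ring

theorem lsd_length (k : Nat) (x : Int) : (lsd k x).length = k := by
  induction k generalizing x with
  | zero => simp [lsd]
  | succ k ih => simp [lsd, ih]

theorem lsd_isDig (k : Nat) (x : Int) (hx : 0 ≤ x) : isDig (lsd k x) := by
  induction k generalizing x with
  | zero => simp [lsd, isDig]
  | succ k ih =>
    intro d hd
    simp only [lsd, List.mem_cons] at hd
    rcases hd with h | h
    · subst h; omega
    · exact ih (x / 10) (by omega) d h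

theorem numOfB_reverse_lsd (k : Nat) (x : Int) (h0 : 0 ≤ x) (h1 : x < 10 ^ k) :
    numOfB ((lsd k x).reverse) = x := by
  induction k generalizing x with
  | zero =>
    simp only [pow_zero] at h1
    have : x = 0 := by omega
    simp [lsd, numOfB, this]
  | succ k ih =>
    have hpow : (10:Int) ^ (k + 1) = 10 ^ k * 10 := pow_succ 10 k
    have hx' : x / 10 < 10 ^ k := by
      generalize hP : ((10:Int) ^ k) = P at *
      omega
    simp only [lsd, List.reverse_cons]
    rw [numOfB_append, ih (x / 10) (by omega) hx']
    omega

theorem lsd_numOfB (l : List Int) (h : isDig l) : lsd l.length (numOfB l) = l.reverse := by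
  induction l using List.reverseRecOn with
  | nil => simp [lsd]
  | append_singleton l' d ih =>
    have hl' : isDig l' := fun x hx => h x (by simp [hx])
    have hd := h d (by simp)
    have hN := numOfB_bounds l' hl'
    have hlen : (l' ++ [d]).length = l'.length + 1 := by simp
    rw [hlen, numOfB_append, lsd]
    have h1 : (10 * numOfB l' + d) % 10 = d := by omega
    have h2 : (10 * numOfB l' + d) / 10 = numOfB l' := by omega
    rw [h1, h2, ih hl']
    simp

theorem sumPow_lsd_zero (n k : Nat) (hn : 1 ≤ n) : sumPow n (lsd k 0) = 0 := by
  induction k with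
  | zero => simp [lsd, sumPow]
  | succ k ih =>
    show sumPow n ((0:Int) % 10 :: lsd k ((0:Int) / 10)) = 0
    have hz : ((0:Int)) % 10 = 0 := by norm_num
    have hz' : ((0:Int)) / 10 = 0 := by norm_num
    rw [hz, hz']
    simp only [sumPow, List.map_cons, List.sum_cons]
    rw [zero_pow (by omega : n ≠ 0)]
    simpa [sumPow] using ih

theorem powLoopA_eq (n : Nat) (hn : 1 ≤ n) :
    ∀ (k : Nat) (x acc : Int), 0 ≤ x → x < 10 ^ k →
      powLoopA n x acc = acc + sumPow n (lsd k x) := by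
  intro k
  induction k with
  | zero =>
    intro x acc h0 h1
    simp only [pow_zero] at h1
    have hx : x = 0 := by omega
    rw [powLoopA]
    simp [hx, lsd, sumPow]
  | succ k ih =>
    intro x acc h0 h1
    rw [powLoopA]
    by_cases hx : 0 < x
    · rw [if_pos hx, PySem.Int.floordiv_eq_ediv_of_pos (by norm_num),
        PySem.Int.mod_eq_emod_of_pos (by norm_num)]
      have hpow : (10:Int) ^ (k + 1) = 10 ^ k * 10 := pow_succ 10 k
      have hx' : x / 10 < 10 ^ k := by
        generalize hP : ((10:Int) ^ k) = P at *
        omega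
      rw [ih (x / 10) (acc + (x % 10) ^ n) (by omega) hx']
      simp only [lsd, sumPow, List.map_cons, List.sum_cons]
      ring
    · rw [if_neg hx]
      have hx0 : x = 0 := by omega
      rw [hx0, sumPow_lsd_zero n (k+1) hn]
      ring

-- first-match lemmas
theorem find?_pairwise {α : Type} {R : α → α → Prop} {L : List α} {p : α → Bool} {a : α}
    (hL : L.Pairwise R) (h : L.find? p = some a) : ∀ b ∈ L, p b → b = a ∨ R a b := by
  induction L with
  | nil => simp at h
  | cons x t ih =>
    rw [List.pairwise_cons] at hL
    intro b hb hpb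
    rw [List.find?_cons] at h
    cases hpx : p x with
    | false =>
      rw [hpx] at h
      rcases List.mem_cons.mp hb with hbx | hbt
      · subst hbx; rw [hpb] at hpx; cases hpx
      · exact ih hL.2 h b hbt hpb
    | true =>
      rw [hpx] at h
      have hax : x = a := by simpa using h
      rcases List.mem_cons.mp hb with hbx | hbt
      · exact Or.inl (hbx.trans hax)
      · exact Or.inr (hax ▸ hL.1 b hbt)

-- scanA is find?
theorem scanA_eq (S : Int) (n : Nat) (L : List Int) :
    scanA S n L = L.find? (fun x => powLoopA n x 0 = S) := by
  induction L with
  | nil => simp [scanA]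
  | cons x t ih =>
    by_cases hx : powLoopA n x 0 = S <;> simp [scanA, hx, ih]

-- outerB/innerB as a find? over pvBigL
theorem innerB_eq (S : Int) (n : Nat) (f : Int) (L : List (List Int)) :
    innerB S n f L = ((L.map (fun r => f :: r)).find? (fun l => sumPowB l n = S)).map numOfB := by
  induction L with
  | nil => simp [innerB]
  | cons r rs ih =>
    by_cases h : sumPowB (f :: r) n = S <;>
      simp [innerB, h, ih]

theorem outerB_eq (S : Int) (n : Nat) (fs : List Int) :
    outerB S n fs =
      (((fs.flatMap (fun f => (combosB f (n - 1)).map (fun r => f :: r))).find?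
        (fun l => sumPowB l n = S)).map numOfB) := by
  induction fs with
  | nil => simp [outerB]
  | cons f fs ih =>
    rw [List.flatMap_cons, List.find?_append]
    rw [outerB, innerB_eq, ih]
    cases hfind : ((combosB f (n - 1)).map (fun r => f :: r)).find? (fun l => sumPowB l n = S) <;>
      simp [Option.or]

-- combos membership
theorem combosB_mem (m : Int) (k : Nat) (l : List Int) :
    l ∈ combosB m k ↔ l.length = k ∧ NI m l := by
  induction k generalizing m l with
  | zero =>
    constructor
    · intro h
      simp only [combosB, List.mem_singleton] at h
      subst h
      exact ⟨rfl, trivial⟩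
    · rintro ⟨hlen, _⟩
      rw [List.length_eq_zero_iff] at hlen
      simp [combosB, hlen]
  | succ k ih =>
    simp only [combosB, List.mem_flatMap, List.mem_map, PySem.List.mem_pyRange_neg_one]
    constructor
    · rintro ⟨d, ⟨hd0, hdm⟩, r, hr, rfl⟩
      have ⟨hlen, hni⟩ := (ih d r).mp hr
      exact ⟨by simp [hlen], by omega, hdm, hni⟩
    · intro ⟨hlen, hni⟩
      match l with
      | d :: r =>
        obtain ⟨h0, h1, h2⟩ := hni
        exact ⟨d, ⟨by omega, h1⟩, r, (ih d r).mpr ⟨by simpa using hlen, h2⟩, rfl⟩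

theorem NI_isDig (m : Int) (l : List Int) (hm : m < 10) (h : NI m l) : isDig l := by
  induction l generalizing m with
  | nil => simp [isDig]
  | cons d t ih =>
    obtain ⟨h0, h1, h2⟩ := h
    intro x hx
    rcases List.mem_cons.mp hx with rfl | hxt
    · omega
    · exact ih d (by omega) h2 x hxt

theorem NI_of_sorted (l : List Int) (hs : l.Pairwise (· ≥ ·)) (h0 : ∀ d ∈ l, 0 ≤ d)
    (m : Int) (hm : ∀ d ∈ l, d ≤ m) : NI m l := by
  induction l generalizing m with
  | nil => trivial
  | cons d t ih =>
    rw [List.pairwise_cons] at hs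
    refine ⟨h0 d (by simp), hm d (by simp), ?_⟩
    exact ih hs.2 (fun x hx => h0 x (by simp [hx])) d (fun x hx => hs.1 x hx)

-- pvBigL membership
theorem pvBigL_mem (n : Nat) (l : List Int) :
    l ∈ pvBigL n ↔ ∃ f rest, l = f :: rest ∧ 1 ≤ f ∧ f ≤ 9 ∧ rest.length = n - 1 ∧ NI f rest := by
  simp only [pvBigL, List.mem_flatMap, List.mem_map, PySem.List.mem_pyRange_neg_one,
    combosB_mem]
  constructor
  · rintro ⟨f, ⟨hf0, hf9⟩, r, ⟨hlen, hni⟩, rfl⟩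
    exact ⟨f, r, rfl, by omega, hf9, hlen, hni⟩
  · rintro ⟨f, r, rfl, hf1, hf9, hlen, hni⟩
    exact ⟨f, ⟨by omega, hf9⟩, r, ⟨hlen, hni⟩, rfl⟩

-- lex order facts (on equal-length digit lists)
theorem lexGT_numOfB (l t : List Int) (h : lexGT l t) (hlen : l.length = t.length)
    (hl : isDig l) (ht : isDig t) : numOfB t < numOfB l := by
  induction l generalizing t with
  | nil => cases t <;> simp [lexGT] at h
  | cons a l' ih =>
    cases t with
    | nil => simp [lexGT] at h
    | cons b t' =>
      simp only [List.length_cons, Nat.add_right_cancel_iff] at hlen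
      have hl' : isDig l' := fun x hx => hl x (by simp [hx])
      have ht' : isDig t' := fun x hx => ht x (by simp [hx])
      have hbndl := numOfB_bounds l' hl'
      have hbndt := numOfB_bounds t' ht'
      rw [numOfB_cons, numOfB_cons, hlen]
      rcases h with hba | ⟨rfl, hlt⟩
      · have hp : (0:Int) < 10 ^ t'.length := by positivity
        rw [hlen] at hbndl
        nlinarith [hbndl.1, hbndt.2]
      · have := ih t' hlt hlen hl' ht'
        omega

theorem lexGE_numOfB (l t : List Int) (h : l = t ∨ lexGT l t) (hlen : l.length = t.length)
    (hl : isDig l) (ht : isDig t) : numOfB t ≤ numOfB l := by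
  rcases h with rfl | h
  · exact le_refl _
  · exact le_of_lt (lexGT_numOfB l t h hlen hl ht)

theorem sorted_lex_max (t l : List Int) (hp : t.Perm l) (hs : l.Pairwise (· ≥ ·)) :
    l = t ∨ lexGT l t := by
  induction t generalizing l with
  | nil =>
    left
    exact hp.symm.eq_nil
  | cons h t' ih =>
    cases l with
    | nil => exact absurd hp.eq_nil (by simp)
    | cons h1 l1 =>
      rw [List.pairwise_cons] at hs
      have hmem : h ∈ h1 :: l1 := hp.mem_iff.mp (by simp)
      have hge : h1 ≥ h := by
        rcases List.mem_cons.mp hmem with rfl | hin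
        · exact le_refl _
        · exact hs.1 h hin
      by_cases heq : h1 = h
      · subst heq
        have hp' : t'.Perm l1 := List.Perm.cons_inv hp
        rcases ih l1 hp' hs.2 with rfl | hlt
        · exact Or.inl rfl
        · exact Or.inr (Or.inr ⟨rfl, hlt⟩)
      · exact Or.inr (Or.inl (by omega))

-- pairwise structure of the enumerations
theorem pairwise_flatMap {α β : Type} {R : β → β → Prop} {S : α → α → Prop}
    (g : α → List β) (L : List α) (hL : L.Pairwise S) (hin : ∀ a ∈ L, (g a).Pairwise R)
    (hcross : ∀ a b, S a b → ∀ x ∈ g a, ∀ y ∈ g b, R x y) :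
    (L.flatMap g).Pairwise R := by
  induction L with
  | nil => simp
  | cons a t ih =>
    rw [List.pairwise_cons] at hL
    rw [List.flatMap_cons, List.pairwise_append]
    refine ⟨hin a (by simp), ih hL.2 (fun b hb => hin b (by simp [hb])), ?_⟩
    intro x hx y hy
    obtain ⟨b, hb, hyb⟩ := List.mem_flatMap.mp hy
    exact hcross a b (hL.1 b hb) x hx y hyb

theorem pyRange_neg_one_pairwise (a b : Int) : (PySem.List.pyRange a b (-1)).Pairwise (· > ·) := by
  rw [PySem.List.pyRange_neg_one_eq_reverse, List.pairwise_reverse]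
  simpa using PySem.List.pairwise_lt_pyRange_one (b + 1) (a + 1)

theorem combosB_pairwise (m : Int) (k : Nat) : (combosB m k).Pairwise lexGT := by
  induction k generalizing m with
  | zero => simp [combosB]
  | succ k ih =>
    refine pairwise_flatMap _ _ (pyRange_neg_one_pairwise m (-1)) ?_ ?_
    · intro d _
      exact (ih d).map _ (fun _ _ h => Or.inr ⟨rfl, h⟩)
    · intro a b hab x hx y hy
      obtain ⟨x', _, rfl⟩ := List.mem_map.mp hx
      obtain ⟨y', _, rfl⟩ := List.mem_map.mp hy
      exact Or.inl hab

theorem pvBigL_pairwise (n : Nat) : (pvBigL n).Pairwise lexGT := by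
  refine pairwise_flatMap _ _ (pyRange_neg_one_pairwise 9 0) ?_ ?_
  · intro f _
    exact (combosB_pairwise f (n - 1)).map _ (fun _ _ h => Or.inr ⟨rfl, h⟩)
  · intro a b hab x hx y hy
    obtain ⟨x', _, rfl⟩ := List.mem_map.mp hx
    obtain ⟨y', _, rfl⟩ := List.mem_map.mp hy
    exact Or.inl hab

-- correspondences
theorem sumPow_perm (n : Nat) (l t : List Int) (h : l.Perm t) : sumPow n l = sumPow n t :=
  (h.map _).sum_eq

theorem sumPow_reverse (n : Nat) (l : List Int) : sumPow n l.reverse = sumPow n l := by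
  simp [sumPow]

theorem numOfB_zero (l : List Int) (h : ∀ d ∈ l, d = 0) : numOfB l = 0 := by
  induction l with
  | nil => rfl
  | cons d t ih =>
    rw [numOfB_cons, h d (by simp), ih (fun x hx => h x (by simp [hx]))]
    ring

theorem pvBigL_facts (n : Nat) (hn : 1 ≤ n) (l : List Int) (hl : l ∈ pvBigL n) :
    l.length = n ∧ isDig l := by
  obtain ⟨f, rest, rfl, hf1, hf9, hlen, hni⟩ := (pvBigL_mem n l).mp hl
  constructor
  · simp [hlen]; omega
  · intro x hx
    rcases List.mem_cons.mp hx with rfl | hxr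
    · omega
    · exact NI_isDig f rest (by omega) hni x hxr

theorem corrB (S : Int) (n : Nat) (hn : 1 ≤ n) (l : List Int) (hl : l ∈ pvBigL n)
    (hp : sumPowB l n = S) :
    (10 ^ (n-1) ≤ numOfB l ∧ numOfB l < 10 ^ n) ∧ powLoopA n (numOfB l) 0 = S := by
  have ⟨hlen, hdig⟩ := pvBigL_facts n hn l hl
  obtain ⟨f, rest, rfl, hf1, hf9, hrlen, hni⟩ := (pvBigL_mem n (l)).mp hl
  have hbnd := numOfB_bounds _ hdig
  have hrest : isDig rest := fun x hx => hdig x (by simp [hx])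
  have hrbnd := numOfB_bounds rest hrest
  have hlow : (10:Int) ^ (n - 1) ≤ numOfB (f :: rest) := by
    rw [numOfB_cons, hrlen]
    have hp10 : (0:Int) < 10 ^ (n - 1) := by positivity
    nlinarith [hrbnd.1]
  refine ⟨⟨hlow, by rw [← hlen]; exact hbnd.2⟩, ?_⟩
  rw [powLoopA_eq n hn n (numOfB (f :: rest)) 0 hbnd.1 (by rw [← hlen]; exact hbnd.2)]
  have hlsd : lsd n (numOfB (f :: rest)) = (f :: rest).reverse := by
    rw [← hlen]
    exact lsd_numOfB _ hdig
  rw [hlsd, sumPow_reverse, ← sumPowB_eq, hp]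
  ring

theorem corrA (S : Int) (n : Nat) (hn : 1 ≤ n) (x : Int) (h0 : 10 ^ (n-1) ≤ x) (h1 : x < 10 ^ n)
    (hp : powLoopA n x 0 = S) :
    ∃ l ∈ pvBigL n, sumPowB l n = S ∧ x ≤ numOfB l := by
  have hx0 : (0:Int) ≤ x := by
    have : (0:Int) < 10 ^ (n - 1) := by positivity
    omega
  set digs := lsd n x with hdigs
  have hdig : isDig digs := lsd_isDig n x hx0
  have hdlen : digs.length = n := lsd_length n x
  have hxval : numOfB digs.reverse = x := numOfB_reverse_lsd n x hx0 h1
  obtain ⟨f, rest, hfr⟩ : ∃ f rest, (List.insertionSort (· ≤ ·) digs).reverse = f :: rest := by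
    cases hcase : (List.insertionSort (· ≤ ·) digs).reverse with
    | nil =>
      have hlc : ((List.insertionSort (· ≤ ·) digs).reverse).length = n := by
        rw [List.length_reverse, (List.perm_insertionSort _ digs).length_eq, hdlen]
      rw [hcase] at hlc
      simp at hlc
      omega
    | cons f rest => exact ⟨f, rest, rfl⟩
  have hperm : (f :: rest).Perm digs := by
    rw [← hfr]
    exact (List.reverse_perm _).trans (List.perm_insertionSort _ digs)
  have hsorted' : (f :: rest).Pairwise (· ≥ ·) := by
    rw [← hfr, List.pairwise_reverse]
    have hbase : (List.insertionSort (· ≤ ·) digs).Pairwise (· ≤ ·) :=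
      List.pairwise_insertionSort _ digs
    exact hbase.imp (fun h => h)
  rw [List.pairwise_cons] at hsorted'
  have hsdig : isDig (f :: rest) := fun d hd => hdig d (hperm.mem_iff.mp hd)
  have hslen : (f :: rest).length = n := by rw [hperm.length_eq, hdlen]
  have hpos : ∃ d ∈ digs, 1 ≤ d := by
    by_contra hcon
    push_neg at hcon
    have hz : ∀ d ∈ digs.reverse, d = 0 := by
      intro d hd
      rw [List.mem_reverse] at hd
      have := hdig d hd
      have := hcon d hd
      omega
    have : x = 0 := by rw [← hxval, numOfB_zero _ hz]
    have h10 : (1:Int) ≤ 10 ^ (n - 1) := one_le_pow₀ (by norm_num)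
    omega
  have hf1 : 1 ≤ f := by
    obtain ⟨d, hd, hd1⟩ := hpos
    have hds : d ∈ f :: rest := hperm.mem_iff.mpr hd
    rcases List.mem_cons.mp hds with rfl | hdr
    · exact hd1
    · exact le_trans hd1 (hsorted'.1 d hdr)
  have hmem : (f :: rest) ∈ pvBigL n := by
    rw [pvBigL_mem]
    refine ⟨f, rest, rfl, hf1, ?_, ?_, ?_⟩
    · have := hsdig f (by simp)
      omega
    · simp at hslen
      omega
    · refine NI_of_sorted rest hsorted'.2 ?_ f (fun d hd => hsorted'.1 d hd)
      intro d hd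
      exact (hsdig d (by simp [hd])).1
  refine ⟨f :: rest, hmem, ?_, ?_⟩
  · rw [sumPowB_eq, sumPow_perm n (f :: rest) digs hperm]
    rw [powLoopA_eq n hn n x 0 hx0 h1] at hp
    rw [← hdigs] at hp
    simpa using hp
  · have hpermR : digs.reverse.Perm (f :: rest) := (List.reverse_perm digs).trans hperm.symm
    have hlex := sorted_lex_max digs.reverse (f :: rest) hpermR (List.pairwise_cons.mpr hsorted')
    have hrevdig : isDig digs.reverse := fun d hd => hdig d (List.mem_reverse.mp hd)
    have hle := lexGE_numOfB (f :: rest) digs.reverse hlex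
      (by rw [hpermR.symm.length_eq]) hsdig hrevdig
    rw [hxval] at hle
    exact hle

theorem main_eq (S : Int) (n : Nat) (hn : 1 ≤ n) :
    scanA S n (PySem.List.pyRange (10 ^ n - 1) ((10:Int) ^ (n-1) - 1) (-1)) =
      outerB S n (PySem.List.pyRange 9 0 (-1)) := by
  rw [scanA_eq, outerB_eq]
  have hbig : ((PySem.List.pyRange 9 0 (-1)).flatMap (fun f => (combosB f (n - 1)).map (fun r => f :: r))) = pvBigL n := rfl
  rw [hbig]
  set LA := PySem.List.pyRange ((10:Int) ^ n - 1) ((10:Int) ^ (n-1) - 1) (-1) with hLA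
  have hmemA : ∀ x : Int, x ∈ LA ↔ 10 ^ (n-1) ≤ x ∧ x < 10 ^ n := by
    intro x
    rw [hLA, PySem.List.mem_pyRange_neg_one]
    omega
  cases hA : LA.find? (fun x => powLoopA n x 0 = S) with
  | none =>
    cases hB : (pvBigL n).find? (fun l => sumPowB l n = S) with
    | none => rfl
    | some l₀ =>
      exfalso
      have hpB : sumPowB l₀ n = S := by simpa using List.find?_some hB
      have hlB : l₀ ∈ pvBigL n := List.mem_of_find?_eq_some hB
      have ⟨⟨hlo, hhi⟩, hpA⟩ := corrB S n hn l₀ hlB hpB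
      have := List.find?_eq_none.mp hA (numOfB l₀) ((hmemA _).mpr ⟨hlo, hhi⟩)
      simp [hpA] at this
  | some a =>
    have hpa : powLoopA n a 0 = S := by simpa using List.find?_some hA
    have hma : a ∈ LA := List.mem_of_find?_eq_some hA
    have ⟨ha0, ha1⟩ := (hmemA a).mp hma
    obtain ⟨l, hlB, hpl, hal⟩ := corrA S n hn a ha0 ha1 hpa
    cases hB : (pvBigL n).find? (fun l => sumPowB l n = S) with
    | none =>
      exfalso
      have := List.find?_eq_none.mp hB l hlB
      simp [hpl] at this
    | some l₀ =>
      have hpB : sumPowB l₀ n = S := by simpa using List.find?_some hB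
      have hl₀B : l₀ ∈ pvBigL n := List.mem_of_find?_eq_some hB
      have ⟨⟨hlo, hhi⟩, hpA⟩ := corrB S n hn l₀ hl₀B hpB
      -- A's first match is the largest matching number
      have hcmp1 := find?_pairwise (pyRange_neg_one_pairwise _ _) hA (numOfB l₀)
        ((hmemA _).mpr ⟨hlo, hhi⟩) (by simp [hpA])
      -- B's first match is lex-largest, hence numerically largest
      have hcmp2 := find?_pairwise (pvBigL_pairwise n) hB l hlB (by simp [hpl])
      have hle : numOfB l ≤ numOfB l₀ := by
        rcases hcmp2 with rfl | hgt
        · exact le_refl _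
        · have ⟨hll, hld⟩ := pvBigL_facts n hn l hlB
          have ⟨hl₀l, hl₀d⟩ := pvBigL_facts n hn l₀ hl₀B
          exact le_of_lt (lexGT_numOfB l₀ l hgt (by omega) hl₀d hld)
      simp only [Option.map_some]
      congr 1
      rcases hcmp1 with heq | hgt
      · exact heq.symm
      · omega

-- ===== VERDICT (by name: the statement is the Claim_ definition above) =====
theorem Zadanie_43_spec : Claim_equal_Zadanie_43 := by
  intro S _
  unfold Spec_Zadanie_43 Zadanie_43 Zadanie_43_alt
  exact main_eq S (pvNLoop S 1) (pvNLoop_ge S 1)
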